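-- pv_equiv track=rewrite | github.com/classskipper351/zb_ringmo | custom_schedule/valid_seq.py | calculate_mb_completed_stages
-- ===== SOURCE A (Python) =====
-- def calculate_mb_completed_stages(sequence, nmb, nstages):
--     f_count=[seq.count('f') for seq in sequence]
--     b_count=[seq.count('b') for seq in sequence]
--     b_count.reverse()
--     total_work = f_count + b_count
--
--     def calculate_stages(total_check, nmb):
--         res = [0] * (nmb*2)
--         for i in range(len(total_check)):
--             # 前 total_check[i] 名选手通过检查点 i
--             for j in range(total_check[i]):
--                 res[j] += 1
--         return res[:nmb]
--
--
--     complete_satges = calculate_stages(total_work, nmb)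
--     #return [ nmb - x for x in complete_satges]
--     return complete_satges
-- ===== SOURCE B (Python) =====
-- def calculate_mb_completed_stages(sequence, nmb, nstages):
--     # Counting/suffix-sum formulation: bucket the per-string 'f'/'b' counts
--     # (clamped to n, since every count >= n contributes to all positions), then
--     # one backward pass of running suffix sums gives res[j] = #counts > j.
--     n = nmb if nmb > 0 else 0
--     bucket = [0] * (n + 1)
--     for s in sequence:
--         bucket[min(s.count('f'), n)] += 1
--         bucket[min(s.count('b'), n)] += 1
--     out = []
--     running = 0
--     for j in range(n - 1, -1, -1):
--         running += bucket[j + 1]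
--         out.append(running)
--     out.reverse()
--     return out
-- ===== Notes on version B (the rewrite author's own statement) =====
-- stated objective: alternative
-- what changed: Replaced the per-checkpoint inner increment loop (touching res[0..count) for every string) by a counting bucket of clamped counts plus one backward suffix-sum pass, so res[j] = #counts > j is computed in one pass.
import Mathlib
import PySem

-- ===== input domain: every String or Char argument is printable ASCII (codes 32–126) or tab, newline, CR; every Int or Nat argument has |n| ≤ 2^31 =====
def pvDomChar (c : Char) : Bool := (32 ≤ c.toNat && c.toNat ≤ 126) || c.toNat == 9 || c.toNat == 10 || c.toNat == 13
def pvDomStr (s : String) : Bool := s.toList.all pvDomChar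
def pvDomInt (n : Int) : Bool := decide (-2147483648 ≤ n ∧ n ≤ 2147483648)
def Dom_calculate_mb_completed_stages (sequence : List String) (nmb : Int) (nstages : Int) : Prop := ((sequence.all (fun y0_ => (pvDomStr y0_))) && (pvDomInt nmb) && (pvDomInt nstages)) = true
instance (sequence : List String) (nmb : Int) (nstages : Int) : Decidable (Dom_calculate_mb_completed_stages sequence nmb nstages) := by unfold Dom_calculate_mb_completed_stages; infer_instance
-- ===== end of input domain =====

-- B replaces A's per-checkpoint inner increment loop by a counting bucket of the
-- clamped per-string counts plus one backward suffix-sum pass.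

-- ===== PORT A =====
-- inner loop 'for j in range(total_check[i]): res[j] += 1'.
-- List.set/List.getD are exact here because Pre_ keeps every index in range
-- (Python raises IndexError on the excluded inputs).
def pvA_inner (res : List Int) (c : Int) : List Int :=
  (PySem.List.pyRange 0 c 1).foldl (fun r j => r.set j.toNat (r.getD j.toNat 0 + 1)) res

def calculate_mb_completed_stages (sequence : List String) (nmb : Int) (nstages : Int) : List Int :=
  let f_count := sequence.map (fun s => (PySem.Str.count s "f" : Int))
  let b_count := (sequence.map (fun s => (PySem.Str.count s "b" : Int))).reverse
  let total_work := f_count ++ b_count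
  let res0 : List Int := List.replicate (nmb * 2).toNat 0
  let res := (PySem.List.pyRange 0 (total_work.length : Int) 1).foldl
      (fun r i => pvA_inner r (PySem.List.pyGetD total_work i 0)) res0
  PySem.List.slice res none (some nmb)

-- ===== PORT B =====
-- bucket[k] += 1
def pvB_bump (b : List Int) (k : Nat) : List Int := b.set k (b.getD k 0 + 1)

def calculate_mb_completed_stages_alt (sequence : List String) (nmb : Int) (nstages : Int) : List Int :=
  let n : Int := if nmb > 0 then nmb else 0
  let bucket0 : List Int := List.replicate (n + 1).toNat 0
  let bucket := sequence.foldl (fun b s =>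
      pvB_bump (pvB_bump b (min (PySem.Str.count s "f" : Int) n).toNat)
               (min (PySem.Str.count s "b" : Int) n).toNat) bucket0
  let st := (PySem.List.pyRange (n - 1) (-1) (-1)).foldl
      (fun (st : Int × List Int) j =>
        let running := st.1 + bucket.getD (j + 1).toNat 0
        (running, st.2 ++ [running])) ((0 : Int), ([] : List Int))
  st.2.reverse

-- ===== PRECONDITION & SPEC =====
-- Pre_ excludes exactly the inputs on which A raises IndexError: some string's
-- 'f' or 'b' count exceeds len(res) = max(2*nmb, 0), so the inner loop runs past res.
def Pre_calculate_mb_completed_stages (sequence : List String) (nmb : Int) (nstages : Int) : Prop :=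
  ∀ s ∈ sequence, (PySem.Str.count s "f" : Int) ≤ max (nmb * 2) 0 ∧
                  (PySem.Str.count s "b" : Int) ≤ max (nmb * 2) 0
instance (sequence : List String) (nmb : Int) (nstages : Int) : Decidable (Pre_calculate_mb_completed_stages sequence nmb nstages) := by unfold Pre_calculate_mb_completed_stages; infer_instance

def pvWitness_calculate_mb_completed_stages : List String × Int × Int := (["fb", "xf"], 2, 1)

def Spec_calculate_mb_completed_stages (sequence : List String) (nmb : Int) (nstages : Int) (out : List Int) : Prop := out = calculate_mb_completed_stages_alt sequence nmb nstages
instance (sequence : List String) (nmb : Int) (nstages : Int) (out : List Int) : Decidable (Spec_calculate_mb_completed_stages sequence nmb nstages out) := by unfold Spec_calculate_mb_completed_stages; infer_instance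

-- ===== CLAIM (what is proved, stated in full; the proofs are below) =====
def Claim_equal_calculate_mb_completed_stages : Prop := ∀ (sequence : List String) (nmb : Int) (nstages : Int), Dom_calculate_mb_completed_stages sequence nmb nstages → Pre_calculate_mb_completed_stages sequence nmb nstages → Spec_calculate_mb_completed_stages sequence nmb nstages (calculate_mb_completed_stages sequence nmb nstages)

-- ===== LEMMAS AND PROOFS =====

-- the common reference value: entry j is the number of per-string 'f'/'b' counts exceeding j
def pvCounts (sequence : List String) : List Int :=
  sequence.map (fun s => (PySem.Str.count s "f" : Int)) ++
  sequence.map (fun s => (PySem.Str.count s "b" : Int))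

def pvSpecList (sequence : List String) (nmb : Int) : List Int :=
  (List.range nmb.toNat).map
    (fun j : Nat => ((pvCounts sequence).countP (fun c => (j : Int) < c) : Int))

theorem pv_getD_set (l : List Int) (i j : Nat) (v : Int) (hi : i < l.length) :
    (l.set i v).getD j 0 = if i = j then v else l.getD j 0 := by
  simp [List.getD, List.getElem?_set]
  split_ifs with h
  · subst h; simp [hi]
  · rfl

theorem pvA_inner_length (res : List Int) (c : Int) : (pvA_inner res c).length = res.length := by
  unfold pvA_inner
  generalize PySem.List.pyRange 0 c 1 = L
  induction L generalizing res with
  | nil => rfl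
  | cons x t ih => simp only [List.foldl_cons]; rw [ih]; simp

theorem pvA_inner_getD (res : List Int) (k : Nat) (j : Nat) (hk : k ≤ res.length) (hj : j < res.length) :
    (pvA_inner res (k : Int)).getD j 0 = res.getD j 0 + if j < k then 1 else 0 := by
  induction k with
  | zero =>
    unfold pvA_inner
    rw [PySem.List.pyRange_one_eq_nil (by omega)]
    simp
  | succ k ih =>
    have hcast : ((k + 1 : Nat) : Int) = (k : Int) + 1 := by push_cast; ring
    unfold pvA_inner
    rw [hcast, PySem.List.pyRange_one_succ_right (by positivity), List.foldl_append]
    have hstep : (PySem.List.pyRange 0 (k : Int) 1).foldl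
        (fun r j => r.set j.toNat (r.getD j.toNat 0 + 1)) res = pvA_inner res (k : Int) := rfl
    simp only [List.foldl_cons, List.foldl_nil, hstep, Int.toNat_natCast]
    rw [pv_getD_set _ k j _ (by rw [pvA_inner_length]; omega)]
    by_cases hjk : k = j
    · subst hjk
      rw [if_pos rfl, ih (by omega)]
      split_ifs <;> omega
    · rw [if_neg hjk, ih (by omega)]
      split_ifs <;> omega

theorem pvA_fold_length (totals : List Int) (res : List Int) :
    (totals.foldl pvA_inner res).length = res.length := by
  induction totals generalizing res with
  | nil => rfl
  | cons c t ih => simp only [List.foldl_cons]; rw [ih, pvA_inner_length]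

theorem pvA_fold_getD (totals : List Int) (res : List Int)
    (h : ∀ c ∈ totals, 0 ≤ c ∧ c ≤ (res.length : Int)) (j : Nat) (hj : j < res.length) :
    (totals.foldl pvA_inner res).getD j 0
      = res.getD j 0 + (totals.countP (fun c => (j : Int) < c) : Int) := by
  induction totals generalizing res with
  | nil => simp
  | cons c t ih =>
    obtain ⟨hc0, hcl⟩ := h c List.mem_cons_self
    have hceq : ((c.toNat : Nat) : Int) = c := by omega
    simp only [List.foldl_cons]
    rw [ih (pvA_inner res c) (by
        intro x hx
        rw [pvA_inner_length]
        exact h x (List.mem_cons_of_mem _ hx)) (by rw [pvA_inner_length]; omega)]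
    rw [← hceq, pvA_inner_getD res c.toNat j (by omega) hj]
    rw [List.countP_cons]
    have : (decide ((j:Int) < c) = true) ↔ (j < c.toNat) := by rw [decide_eq_true_iff]; omega
    by_cases hjc : j < c.toNat
    · rw [if_pos hjc, if_pos (by simpa [hceq] using this.mpr hjc)]
      push_cast; ring
    · rw [if_neg hjc, if_neg (by simp only [hceq]; intro hcon; exact hjc (this.mp hcon))]
      push_cast; ring

theorem pvA_eq_spec (sequence : List String) (nmb : Int) (nstages : Int)
    (hpre : Pre_calculate_mb_completed_stages sequence nmb nstages) :
    calculate_mb_completed_stages sequence nmb nstages = pvSpecList sequence nmb := by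
  unfold calculate_mb_completed_stages
  dsimp only
  rw [PySem.List.foldl_pyRange_zero_pyGetD']
  set fL := sequence.map (fun s => (PySem.Str.count s "f" : Int)) with hfL
  set bL := sequence.map (fun s => (PySem.Str.count s "b" : Int)) with hbL
  set totals := fL ++ bL.reverse with htotals
  set m := (nmb * 2).toNat with hm
  set res := totals.foldl pvA_inner (List.replicate m 0) with hres
  have hlen : res.length = m := by rw [hres, pvA_fold_length, List.length_replicate]
  have hmem : ∀ c ∈ totals, 0 ≤ c ∧ c ≤ ((List.replicate m (0:Int)).length : Int) := by
    intro c hc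
    simp only [List.length_replicate]
    rw [htotals] at hc
    rcases List.mem_append.mp hc with hc | hc
    · rw [hfL] at hc
      obtain ⟨s, hs, rfl⟩ := List.mem_map.mp hc
      have := (hpre s hs).1
      constructor
      · positivity
      · omega
    · rw [List.mem_reverse, hbL] at hc
      obtain ⟨s, hs, rfl⟩ := List.mem_map.mp hc
      have := (hpre s hs).2
      constructor
      · positivity
      · omega
  by_cases hn : 0 ≤ nmb
  · rw [PySem.List.slice_to res hn]
    apply List.ext_getElem
    · simp [pvSpecList, hlen]
      omega
    · intro i h1 h2
      have hilt : i < nmb.toNat := by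
        simp only [pvSpecList, List.length_map, List.length_range] at h2; exact h2
      have hires : i < res.length := by omega
      rw [List.getElem_take]
      rw [← List.getD_eq_getElem res 0 hires]
      rw [hres, pvA_fold_getD totals _ hmem i (by simpa using (by omega : i < m))]
      rw [List.getD_replicate]
      have hrhs : (pvSpecList sequence nmb)[i]'h2
          = ((pvCounts sequence).countP (fun c => (i : Int) < c) : Int) := by
        unfold pvSpecList
        rw [List.getElem_map, List.getElem_range]
      rw [hrhs]
      simp [pvCounts, htotals, List.countP_append, List.countP_reverse, hfL, hbL]
      omega
  · have hm0 : m = 0 := by omega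
    have : res = [] := List.eq_nil_of_length_eq_zero (by omega)
    rw [this]
    have : nmb.toNat = 0 := by omega
    simp [pvSpecList, this, PySem.List.slice]

theorem pvB_bump_length (b : List Int) (k : Nat) : (pvB_bump b k).length = b.length := by
  simp [pvB_bump]

theorem pvB_fold_getD (K : List Nat) (b : List Int) (h : ∀ k ∈ K, k < b.length)
    (j : Nat) (hj : j < b.length) :
    (K.foldl pvB_bump b).getD j 0 = b.getD j 0 + (K.count j : Int) := by
  induction K generalizing b with
  | nil => simp
  | cons k t ih =>
    have hk := h k List.mem_cons_self
    simp only [List.foldl_cons]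
    rw [ih (pvB_bump b k) (by intro x hx; rw [pvB_bump_length]; exact h x (List.mem_cons_of_mem _ hx))
        (by rw [pvB_bump_length]; omega)]
    unfold pvB_bump
    rw [pv_getD_set _ k j _ hk, List.count_cons]
    by_cases hkj : k = j
    · subst hkj
      simp
      push_cast; ring
    · rw [if_neg hkj, if_neg (by simpa using hkj)]
      push_cast; ring

theorem pv_drop_sum (b : List Int) (m : Nat) :
    b.getD m 0 + (b.drop (m + 1)).sum = (b.drop m).sum := by
  by_cases h : m < b.length
  · rw [List.getD_eq_getElem _ _ h]
    conv_rhs => rw [List.drop_eq_getElem_cons h]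
    rw [List.sum_cons]
  · rw [List.getD_eq_default _ _ (by omega), List.drop_eq_nil_of_le (by omega),
      List.drop_eq_nil_of_le (by omega)]
    simp

theorem pvB_loop (bucket : List Int) (k : Nat) (out : List Int) :
    (PySem.List.pyRange ((k : Int) - 1) (-1) (-1)).foldl
      (fun (st : Int × List Int) j =>
        let running := st.1 + bucket.getD (j + 1).toNat 0
        (running, st.2 ++ [running])) ((bucket.drop (k + 1)).sum, out)
    = ((bucket.drop 1).sum, out ++ (List.range k).map (fun i => (bucket.drop (k - i)).sum)) := by
  induction k generalizing out with
  | zero =>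
    rw [show ((0:Nat):Int) - 1 = (-1 : Int) by norm_num]
    rw [PySem.List.pyRange_neg_one_eq_nil (by norm_num)]
    simp
  | succ k ih =>
    have h1 : ((k+1:Nat):Int) - 1 = (k:Int) := by push_cast; ring
    rw [h1, PySem.List.pyRange_neg_one_cons (by omega : (-1 : Int) < (k : Int))]
    simp only [List.foldl_cons]
    have h2 : ((k : Int) + 1).toNat = k + 1 := by omega
    have hrun : (bucket.drop (k+1+1)).sum + bucket.getD ((k : Int) + 1).toNat 0
        = (bucket.drop (k+1)).sum := by
      rw [h2, add_comm]; exact pv_drop_sum bucket (k+1)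
    rw [hrun, ih (out ++ [(bucket.drop (k+1)).sum])]
    simp [List.range_succ_eq_map, List.map_map, Function.comp, Nat.succ_sub_succ]

theorem pv_ind_sum (k a m : Nat) (h : k < a + m) :
    ((List.range' a m).map (fun i => if k == i then (1 : Int) else 0)).sum
      = if a ≤ k then 1 else 0 := by
  induction m generalizing a with
  | zero => simp; omega
  | succ m ih =>
    rw [List.range'_succ]
    simp only [List.map_cons, List.sum_cons]
    by_cases hk : a = k
    · subst hk
      have h2 : ((List.range' (a+1) m).map (fun i => if a == i then (1 : Int) else 0)).sum = 0 := by
        rw [List.sum_eq_zero]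
        intro x hx
        simp only [List.mem_map] at hx
        obtain ⟨i, hi, rfl⟩ := hx
        have := List.mem_range'.mp hi
        simp only [beq_iff_eq]
        rw [if_neg (by omega)]
      rw [h2]; simp
    · rw [ih (a+1) (by omega)]
      have : (k == a) = false := by simp; exact fun h' => hk h'.symm
      rw [this]
      simp only [Bool.false_eq_true, if_false, zero_add]
      split_ifs <;> omega

theorem pv_sum_count_range' (K : List Nat) (a m : Nat) (hK : ∀ k ∈ K, k < a + m) :
    ((List.range' a m).map (fun i => (K.count i : Int))).sum
      = (K.countP (fun k => a ≤ k) : Int) := by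
  induction K with
  | nil => simp
  | cons k t ih =>
    have hk := hK k List.mem_cons_self
    have hmap : (List.range' a m).map (fun i => ((k :: t).count i : Int))
        = (List.range' a m).map (fun i => (t.count i : Int) + if k == i then (1:Int) else 0) := by
      apply List.map_congr_left
      intro i _
      rw [List.count_cons]
      push_cast
      split_ifs <;> simp
    rw [hmap, PySem.List.sum_map_add_int, ih (fun x hx => hK x (List.mem_cons_of_mem _ hx))]
    rw [pv_ind_sum k a m hk, List.countP_cons]
    by_cases hak : a ≤ k
    · rw [if_pos hak, if_pos (by simpa using hak)]
      push_cast; ring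
    · rw [if_neg hak, if_neg (by simpa using hak)]
      push_cast; ring

theorem pvB_fold_length (K : List Nat) (b : List Int) : (K.foldl pvB_bump b).length = b.length := by
  induction K generalizing b with
  | nil => rfl
  | cons k t ih => simp only [List.foldl_cons]; rw [ih, pvB_bump_length]

theorem pvB_two_bump (sequence : List String) (f g : String → Nat) (b0 : List Int) :
    sequence.foldl (fun b s => pvB_bump (pvB_bump b (f s)) (g s)) b0
      = (sequence.flatMap (fun s => [f s, g s])).foldl pvB_bump b0 := by
  induction sequence generalizing b0 with
  | nil => rfl
  | cons s t ih => simp only [List.foldl_cons, List.flatMap_cons, List.foldl_append, List.foldl_nil]; rw [ih]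

theorem pv_countP_flatMap_pair (sequence : List String) (q : Nat → Bool) (f g : String → Nat) :
    ((sequence.flatMap (fun s => [f s, g s])).countP q : Int)
      = ((sequence.map f).countP q : Int) + ((sequence.map g).countP q : Int) := by
  induction sequence with
  | nil => simp
  | cons s t ih =>
    simp only [List.flatMap_cons, List.countP_append, List.map_cons, List.countP_cons]
    push_cast at *
    simp only [List.countP_nil, Nat.cast_zero, zero_add]
    rw [ih]
    split_ifs <;> omega

theorem pvB_eq_spec (sequence : List String) (nmb : Int) (nstages : Int) :
    calculate_mb_completed_stages_alt sequence nmb nstages = pvSpecList sequence nmb := by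
  unfold calculate_mb_completed_stages_alt
  dsimp only
  set N := nmb.toNat with hN
  set n : Int := if nmb > 0 then nmb else 0 with hn
  have hnN : n = (N : Int) := by rw [hn, hN]; split_ifs <;> omega
  set kf : String → Nat := fun s => (min (PySem.Str.count s "f" : Int) n).toNat with hkf
  set kb : String → Nat := fun s => (min (PySem.Str.count s "b" : Int) n).toNat with hkb
  set K := sequence.flatMap (fun s => [kf s, kb s]) with hK
  set bucket := sequence.foldl (fun b s => pvB_bump (pvB_bump b (kf s)) (kb s))
      (List.replicate (n + 1).toNat 0) with hbucket
  have hb2 : bucket = K.foldl pvB_bump (List.replicate (n + 1).toNat 0) := by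
    rw [hbucket, pvB_two_bump, hK]
  clear_value N n kf kb K bucket
  have hlen1 : (n + 1).toNat = N + 1 := by omega
  have hblen : bucket.length = N + 1 := by
    rw [hb2, pvB_fold_length, List.length_replicate, hlen1]
  have hKlt : ∀ k ∈ K, k < N + 1 := by
    intro k hk
    rw [hK] at hk
    simp only [List.mem_flatMap, List.mem_cons] at hk
    obtain ⟨s, _, hk⟩ := hk
    rcases hk with rfl | hk
    · simp only [hkf]; omega
    · rcases hk with rfl | hk
      · simp only [hkb]; omega
      · simp at hk
  have hbgetD : ∀ i < N + 1, bucket.getD i 0 = (K.count i : Int) := by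
    intro i hi
    have hKlt' : ∀ k ∈ K, k < (List.replicate (n + 1).toNat (0:Int)).length := by
      intro k hk
      have := hKlt k hk
      simp only [List.length_replicate]
      omega
    have hi' : i < (List.replicate (n + 1).toNat (0:Int)).length := by
      simp only [List.length_replicate]
      omega
    rw [hb2, pvB_fold_getD K _ hKlt' i hi', List.getD_replicate]
    all_goals omega
  -- the backward loop
  have hzero : ((0 : Int), ([] : List Int)) = ((bucket.drop (N + 1)).sum, ([] : List Int)) := by
    rw [List.drop_eq_nil_of_le (by omega)]; simp
  rw [hnN, hzero, pvB_loop bucket N []]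
  -- element-wise comparison
  apply List.ext_getElem
  · simp [pvSpecList, hN]
  · intro j h1 h2
    have hjN : j < N := by simpa using h1
    rw [List.getElem_reverse]
    simp only [List.getElem_map, List.getElem_range, List.length_map, List.length_range, List.nil_append]
    have hidx : N - (N - 1 - j) = j + 1 := by omega
    rw [hidx]
    -- suffix sum = countP
    have hdrop : bucket.drop (j + 1) = (List.range' (j+1) (N - j)).map (fun i => (K.count i : Int)) := by
      apply List.ext_getElem
      · simp [hblen]
      · intro i hi1 hi2
        have hiN : i < N - j := by
          rw [List.length_drop, hblen] at hi1
          omega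
        rw [List.getElem_drop, List.getElem_map, List.getElem_range']
        rw [← List.getD_eq_getElem bucket 0 (by omega)]
        have h5 : j + 1 + 1 * i = j + 1 + i := by ring
        rw [h5, hbgetD (j + 1 + i) (by omega)]
    rw [hdrop, pv_sum_count_range' K (j+1) (N - j) (by intro k hk; have := hKlt k hk; omega)]
    -- reduce both countP's to the same count over `sequence`
    have hrhs : (pvSpecList sequence nmb)[j]'h2
        = ((pvCounts sequence).countP (fun c => (j : Int) < c) : Int) := by
      unfold pvSpecList
      rw [List.getElem_map, List.getElem_range]
    rw [hrhs]
    unfold pvCounts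
    rw [List.countP_append, hK, pv_countP_flatMap_pair]
    have hf : ((sequence.map kf).countP (fun k => j + 1 ≤ k) : Int)
        = ((sequence.map (fun s => (PySem.Str.count s "f" : Int))).countP (fun c => (j : Int) < c) : Int) := by
      rw [List.countP_map, List.countP_map]
      congr 1
      apply List.countP_congr
      intro s _
      simp only [Function.comp, hkf, decide_eq_true_eq]
      omega
    have hb : ((sequence.map kb).countP (fun k => j + 1 ≤ k) : Int)
        = ((sequence.map (fun s => (PySem.Str.count s "b" : Int))).countP (fun c => (j : Int) < c) : Int) := by
      rw [List.countP_map, List.countP_map]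
      congr 1
      apply List.countP_congr
      intro s _
      simp only [Function.comp, hkb, decide_eq_true_eq]
      omega
    rw [hf, hb]
    push_cast; ring

-- ===== VERDICT (by name: the statement is the Claim_ definition above) =====
theorem calculate_mb_completed_stages_spec : Claim_equal_calculate_mb_completed_stages := by
  intro sequence nmb nstages _hdom hpre
  unfold Spec_calculate_mb_completed_stages
  rw [pvA_eq_spec sequence nmb nstages hpre, pvB_eq_spec]
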